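-- pv_equiv track=rewrite | github.com/Muzhouyushui/TabHGIF | bank/HGAT/GIF_HGAT_ROW_NEI.py | find_hyperneighbors
-- ===== SOURCE A (Python) =====
-- from collections import defaultdict
--
-- def find_hyperneighbors(hyperedges: dict, deleted: list, K: int):
--     """
--     Find all neighbor nodes that share at least K hyperedges with any deleted node.
--     Optimization: first build a node→edge reverse index, then scan related hyperedges for each deleted node.
--
--     Args:
--       hyperedges: Dict[int, List[int]]  Hyperedge dictionary, key is hyperedge ID, value is node list
--       deleted:    List[int]             List of deleted nodes
--       K:          int                   Threshold: share at least K hyperedges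
--
--     Returns:
--       List[int]   List of neighbor nodes
--     """
--     # 1) Build reverse index: node → list of incident hyperedge IDs
--     node2edges = defaultdict(list)
--     for eid, hedge in hyperedges.items():
--         for node in hedge:
--             node2edges[node].append(eid)
--
--     neighbors = set()
--     # 2) For each deleted node, scan the hyperedges it belongs to
--     for d in deleted:
--         cnt = {}
--         for eid in node2edges.get(d, []):
--             for node in hyperedges[eid]:
--                 if node != d:
--                     cnt[node] = cnt.get(node, 0) + 1
--         # 3) Threshold filtering
--         for node, c in cnt.items():
--             if c >= K:
--                 neighbors.add(node)
--
--     return list(neighbors)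
-- ===== SOURCE B (Python) =====
-- def find_hyperneighbors(hyperedges: dict, deleted: list, K: int):
--     """One pass over the hyperedges themselves: no node-to-edge reverse index.
--
--     For every occurrence of a deleted node d in an edge, bump a per-d counter
--     once for each member of that edge (skipping members equal to d), then
--     threshold each deleted node's counter.
--     """
--     deleted_set = set(deleted)
--     cnt = {}  # deleted node -> {node: shared-edge count (with occurrence multiplicity)}
--     for hedge in hyperedges.values():
--         for d in hedge:
--             if d in deleted_set:
--                 c = cnt.get(d, {})
--                 for node in hedge:
--                     if node != d:
--                         c[node] = c.get(node, 0) + 1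
--                 cnt[d] = c
--     neighbors = set()
--     for d in deleted:
--         for node, c in cnt.get(d, {}).items():
--             if c >= K:
--                 neighbors.add(node)
--     return list(neighbors)
-- ===== Notes on version B (the rewrite author's own statement) =====
-- stated objective: faster
-- what changed: B drops A's node-to-edge reverse index and makes a single pass over the hyperedges (edges outer, deleted members inner), accumulating one counter dict per distinct deleted node and thresholding at the end, so the per-deleted-node rescan of A disappears; Pre_ only excludes association lists with duplicate hyperedge ids, which do not encode any Python dict, so no Python input A returns on is excluded.
import Mathlib
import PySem

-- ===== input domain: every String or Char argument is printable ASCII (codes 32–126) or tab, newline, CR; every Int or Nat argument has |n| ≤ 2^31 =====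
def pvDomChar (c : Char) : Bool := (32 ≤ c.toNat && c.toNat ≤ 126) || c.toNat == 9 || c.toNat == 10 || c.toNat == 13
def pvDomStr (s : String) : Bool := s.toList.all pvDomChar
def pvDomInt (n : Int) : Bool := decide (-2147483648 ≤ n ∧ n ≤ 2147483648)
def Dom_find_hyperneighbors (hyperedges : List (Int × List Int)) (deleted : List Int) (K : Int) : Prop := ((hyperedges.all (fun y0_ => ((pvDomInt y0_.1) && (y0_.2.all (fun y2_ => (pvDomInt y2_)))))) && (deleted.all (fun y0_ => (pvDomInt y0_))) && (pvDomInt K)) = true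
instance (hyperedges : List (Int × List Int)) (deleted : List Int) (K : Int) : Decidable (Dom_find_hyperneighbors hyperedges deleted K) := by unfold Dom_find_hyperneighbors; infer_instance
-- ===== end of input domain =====

-- B replaces A's node→edge reverse index by a single pass over the hyperedges themselves
-- (edges outer, deleted members inner); equivalence of the RETURN VALUE is proved below.

-- ===== PORT A =====
def find_hyperneighbors (hyperedges : List (Int × List Int)) (deleted : List Int) (K : Int) : List Int :=
  -- 1) node2edges = defaultdict(list); for eid, hedge in hyperedges.items(): for node in hedge: node2edges[node].append(eid)
  let node2edges : PySem.Dict Int (List Int) :=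
    hyperedges.foldl (fun n2e p =>
      p.2.foldl (fun n2e node => n2e.modify node [] (fun l => l ++ [p.1])) n2e)
      PySem.Dict.empty
  -- the dict `hyperedges` itself, for the lookups hyperedges[eid]
  let hdict : PySem.Dict Int (List Int) := PySem.Dict.mk hyperedges
  let neighbors : PySem.Set Int :=
    deleted.foldl (fun neighbors d =>
      -- 2) cnt = {}; for eid in node2edges.get(d, []): for node in hyperedges[eid]: if node != d: cnt[node] = cnt.get(node, 0) + 1
      -- (every eid in node2edges comes from hyperedges, so the lookup hyperedges[eid] never raises KeyError: getD is exact here)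
      let cnt : PySem.Dict Int Int :=
        (node2edges.getD d []).foldl (fun cnt eid =>
          (hdict.getD eid []).foldl (fun cnt node =>
            if node ≠ d then cnt.insert node (cnt.getD node 0 + 1) else cnt) cnt)
          PySem.Dict.empty
      -- 3) for node, c in cnt.items(): if c >= K: neighbors.add(node)
      cnt.items.foldl (fun neighbors pc =>
        if K ≤ pc.2 then PySem.Set.add neighbors pc.1 else neighbors) neighbors)
      PySem.Set.empty
  neighbors

-- ===== PORT B =====
def find_hyperneighbors_alt (hyperedges : List (Int × List Int)) (deleted : List Int) (K : Int) : List Int :=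
  -- deleted_set = set(deleted)
  let dset : PySem.Set Int := PySem.Set.ofList deleted
  -- for hedge in hyperedges.values(): for d in hedge: if d in deleted_set:
  --   c = cnt.get(d, {}); for node in hedge: if node != d: c[node] = c.get(node, 0) + 1; cnt[d] = c
  let cnt : PySem.Dict Int (PySem.Dict Int Int) :=
    hyperedges.foldl (fun cnt p =>
      p.2.foldl (fun cnt d =>
        if PySem.Set.contains dset d then
          cnt.modify d PySem.Dict.empty (fun c =>
            p.2.foldl (fun c node =>
              if node ≠ d then c.insert node (c.getD node 0 + 1) else c) c)
        else cnt) cnt)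
      PySem.Dict.empty
  -- for d in deleted: for node, c in cnt.get(d, {}).items(): if c >= K: neighbors.add(node)
  let neighbors : PySem.Set Int :=
    deleted.foldl (fun neighbors d =>
      (cnt.getD d PySem.Dict.empty).items.foldl (fun neighbors pc =>
        if K ≤ pc.2 then PySem.Set.add neighbors pc.1 else neighbors) neighbors)
      PySem.Set.empty
  neighbors

-- ===== PRECONDITION & SPEC =====
-- Pre_ excludes only association lists with a duplicate hyperedge id: those do not encode any
-- Python dict (A's first argument is a dict, whose keys are necessarily distinct), so no input
-- on which the Python A returns is excluded.
def Pre_find_hyperneighbors (hyperedges : List (Int × List Int)) (deleted : List Int) (K : Int) : Prop :=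
  (hyperedges.map Prod.fst).Nodup
instance (hyperedges : List (Int × List Int)) (deleted : List Int) (K : Int) : Decidable (Pre_find_hyperneighbors hyperedges deleted K) := by unfold Pre_find_hyperneighbors; infer_instance
def pvWitness_find_hyperneighbors : (List (Int × List Int)) × List Int × Int :=
  ([(1, [2, 3]), (2, [2, 4]), (3, [3, 4])], [2, 4], 1)
def Spec_find_hyperneighbors (hyperedges : List (Int × List Int)) (deleted : List Int) (K : Int) (out : List Int) : Prop := out = find_hyperneighbors_alt hyperedges deleted K
instance (hyperedges : List (Int × List Int)) (deleted : List Int) (K : Int) (out : List Int) : Decidable (Spec_find_hyperneighbors hyperedges deleted K out) := by unfold Spec_find_hyperneighbors; infer_instance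

-- ===== CLAIM (what is proved, stated in full; the proofs are below) =====
def Claim_equal_find_hyperneighbors : Prop := ∀ (hyperedges : List (Int × List Int)) (deleted : List Int) (K : Int), Dom_find_hyperneighbors hyperedges deleted K → Pre_find_hyperneighbors hyperedges deleted K → Spec_find_hyperneighbors hyperedges deleted K (find_hyperneighbors hyperedges deleted K)

-- ===== LEMMAS AND PROOFS =====

-- canonical per-d counter
def hnCanon (hs : List (Int × List Int)) (d : Int) : PySem.Dict Int Int :=
  hs.foldl (fun c p =>
    (p.2.filter (fun x => x == d)).foldl (fun c _ =>
      p.2.foldl (fun c node => if node ≠ d then c.insert node (c.getD node 0 + 1) else c) c) c)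
    PySem.Dict.empty

-- A1: node2edges entry
theorem hnA1 (hs : List (Int × List Int)) (D : PySem.Dict Int (List Int)) (d : Int) :
    (hs.foldl (fun n2e p => p.2.foldl (fun n2e node => n2e.modify node [] (fun l => l ++ [p.1])) n2e) D).getD d []
    = D.getD d [] ++ hs.flatMap (fun p => (p.2.filter (fun x => x == d)).map (fun _ => p.1)) := by
  induction hs generalizing D with
  | nil => simp
  | cons p t ih =>
    simp only [List.foldl_cons, List.flatMap_cons, ih]
    have h1 : p.2.foldl (fun n2e node => PySem.Dict.modify n2e node [] (fun l => l ++ [p.1])) D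
        = (p.2.map (fun node => (node, p.1))).foldl (fun n2e q => PySem.Dict.modify n2e q.1 [] (fun l => l ++ [q.2])) D := by
      rw [List.foldl_map]
    rw [h1, PySem.Dict.getD_foldl_modify_append]
    simp [List.filter_map, List.map_map, Function.comp_def, List.append_assoc]

-- A2: A's cnt = canonical
theorem hnA2 (hs : List (Int × List Int)) (d : Int) (hnd : (hs.map Prod.fst).Nodup) :
    (hs.flatMap (fun p => (p.2.filter (fun x => x == d)).map (fun _ => p.1))).foldl
      (fun cnt eid => ((PySem.Dict.mk hs).getD eid []).foldl
        (fun cnt node => if node ≠ d then cnt.insert node (cnt.getD node 0 + 1) else cnt) cnt)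
      PySem.Dict.empty
    = hnCanon hs d := by
  rw [List.foldl_flatMap, hnCanon]
  apply PySem.List.foldl_congr_mem
  intro acc p hp
  rw [List.foldl_map]
  have hget : (PySem.Dict.mk hs).getD p.1 [] = p.2 := by
    apply PySem.Dict.getD_of_mem_items
    · exact hp
    · simpa [PySem.Dict.keys] using hnd
  rw [hget]

-- B1: per-edge effect on entry d
theorem hnB1 (l hedge : List Int) (dset : PySem.Set Int) (d : Int)
    (hd : PySem.Set.contains dset d = true) (cnt : PySem.Dict Int (PySem.Dict Int Int)) :
    (l.foldl (fun cnt x =>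
        if PySem.Set.contains dset x then
          cnt.modify x PySem.Dict.empty (fun c =>
            hedge.foldl (fun c node => if node ≠ x then c.insert node (c.getD node 0 + 1) else c) c)
        else cnt) cnt).getD d PySem.Dict.empty
    = (l.filter (fun x => x == d)).foldl (fun c _ =>
        hedge.foldl (fun c node => if node ≠ d then c.insert node (c.getD node 0 + 1) else c) c)
        (cnt.getD d PySem.Dict.empty) := by
  induction l generalizing cnt with
  | nil => simp
  | cons x t ih =>
    simp only [List.foldl_cons, List.filter_cons]
    by_cases hx : x = d
    · subst hx
      rw [if_pos hd, ih, PySem.Dict.getD_modify_self]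
      simp
    · have hne : d ≠ x := fun h => hx h.symm
      have hbx : (x == d) = false := by simp [hx]
      rw [hbx]
      by_cases hc : PySem.Set.contains dset x = true
      · rw [if_pos hc, ih, PySem.Dict.getD_modify_of_ne (hne := hne)]
        simp
      · rw [if_neg hc, ih]
        simp

-- B2: entry d of B's big counter dict = canonical
theorem hnB2 (hs : List (Int × List Int)) (dset : PySem.Set Int) (d : Int)
    (hd : PySem.Set.contains dset d = true) :
    ((hs.foldl (fun cnt p =>
        p.2.foldl (fun cnt x =>
          if PySem.Set.contains dset x then
            cnt.modify x PySem.Dict.empty (fun c =>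
              p.2.foldl (fun c node => if node ≠ x then c.insert node (c.getD node 0 + 1) else c) c)
          else cnt) cnt)
      PySem.Dict.empty).getD d PySem.Dict.empty)
    = hnCanon hs d := by
  rw [hnCanon]
  suffices h : ∀ (cnt : PySem.Dict Int (PySem.Dict Int Int)),
      ((hs.foldl (fun cnt p =>
        p.2.foldl (fun cnt x =>
          if PySem.Set.contains dset x then
            cnt.modify x PySem.Dict.empty (fun c =>
              p.2.foldl (fun c node => if node ≠ x then c.insert node (c.getD node 0 + 1) else c) c)
          else cnt) cnt) cnt).getD d PySem.Dict.empty)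
      = hs.foldl (fun c p =>
          (p.2.filter (fun x => x == d)).foldl (fun c _ =>
            p.2.foldl (fun c node => if node ≠ d then c.insert node (c.getD node 0 + 1) else c) c) c)
          (cnt.getD d PySem.Dict.empty) by
    simpa using h PySem.Dict.empty
  induction hs with
  | nil => intro cnt; rfl
  | cons p t ih =>
    intro cnt
    simp only [List.foldl_cons]
    rw [ih, hnB1 p.2 p.2 dset d hd]

-- contains test on the ported deleted_set
theorem hnContains (xs : List Int) (d : Int) (h : d ∈ xs) :
    PySem.Set.contains (PySem.Set.ofList xs) d = true := by
  simp [pysem, h]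

-- ===== VERDICT (by name: the statement is the Claim_ definition above) =====
theorem find_hyperneighbors_spec : Claim_equal_find_hyperneighbors := by
  intro hs dl K _ hpre
  unfold Spec_find_hyperneighbors
  simp only [find_hyperneighbors, find_hyperneighbors_alt]
  apply PySem.List.foldl_congr_mem
  intro acc d hd
  rw [hnA1, hnB2 hs (PySem.Set.ofList dl) d (hnContains dl d hd)]
  simp only [PySem.Dict.getD_empty, List.nil_append]
  rw [hnA2 hs d hpre]
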